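-- pv_equiv track=rewrite | github.com/wyl2607/jetscope | tools/automation/scripts/evolution-registry.py | _duplicate_ids
-- ===== SOURCE A (Python) =====
-- def _duplicate_ids(values: list[str]) -> list[str]:
--     seen: set[str] = set()
--     duplicates: set[str] = set()
--     for value in values:
--         if value in seen:
--             duplicates.add(value)
--         seen.add(value)
--     return sorted(duplicates)
-- ===== SOURCE B (Python) =====
-- def _duplicate_ids(values: list[str]) -> list[str]:
--     ordered = sorted(values)
--     duplicates: set[str] = set()
--     for prev, cur in zip(ordered, ordered[1:]):
--         if prev == cur:
--             duplicates.add(cur)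
--     return sorted(duplicates)
-- ===== Notes on version B (the rewrite author's own statement) =====
-- stated objective: alternative
-- what changed: Replaces incremental two-set membership tracking with sort-once-then-scan-adjacent-pairs: a value is a duplicate iff it equals its neighbour in the sorted list.
import Mathlib
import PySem

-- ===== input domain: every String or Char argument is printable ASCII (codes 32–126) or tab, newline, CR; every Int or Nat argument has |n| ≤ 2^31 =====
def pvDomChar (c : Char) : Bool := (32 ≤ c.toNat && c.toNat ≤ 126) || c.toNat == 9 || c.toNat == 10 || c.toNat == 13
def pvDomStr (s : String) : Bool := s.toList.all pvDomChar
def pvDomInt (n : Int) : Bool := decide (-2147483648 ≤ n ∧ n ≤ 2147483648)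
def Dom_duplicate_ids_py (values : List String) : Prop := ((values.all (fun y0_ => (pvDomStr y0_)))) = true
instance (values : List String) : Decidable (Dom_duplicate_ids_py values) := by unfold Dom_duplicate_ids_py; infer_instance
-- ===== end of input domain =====

-- B replaces A's incremental two-set tracking by sort-once-then-scan-adjacent-pairs (alternative algorithm, same cost).

-- ===== PORT A =====
def duplicate_ids_py (values : List String) : List String :=
  let st := values.foldl
    (fun (p : PySem.Set String × PySem.Set String) value =>
      (PySem.Set.add p.1 value,
       if PySem.Set.contains p.1 value then PySem.Set.add p.2 value else p.2))
    (PySem.Set.empty, PySem.Set.empty)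
  PySem.List.sorted st.2 (fun x => x) false

-- ===== PORT B =====
def duplicate_ids_py_alt (values : List String) : List String :=
  let ordered := PySem.List.sorted values (fun x => x) false
  let duplicates := (List.zip ordered (PySem.List.slice ordered (some 1) none)).foldl
    (fun (d : PySem.Set String) pc => if pc.1 == pc.2 then PySem.Set.add d pc.2 else d)
    PySem.Set.empty
  PySem.List.sorted duplicates (fun x => x) false

-- ===== PRECONDITION & SPEC =====
def Spec_duplicate_ids_py (values : List String) (out : List String) : Prop := out = duplicate_ids_py_alt values
instance (values : List String) (out : List String) : Decidable (Spec_duplicate_ids_py values out) := by unfold Spec_duplicate_ids_py; infer_instance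

-- ===== CLAIM (what is proved, stated in full; the proofs are below) =====
def Claim_equal_duplicate_ids_py : Prop := ∀ (values : List String), Dom_duplicate_ids_py values → Spec_duplicate_ids_py values (duplicate_ids_py values)

-- ===== LEMMAS AND PROOFS =====

-- membership in A's duplicates set after the fold
theorem memA (values : List String) (seen dup : PySem.Set String) (x : String) :
    x ∈ (values.foldl
      (fun (p : PySem.Set String × PySem.Set String) value =>
        (PySem.Set.add p.1 value,
         if PySem.Set.contains p.1 value then PySem.Set.add p.2 value else p.2))
      (seen, dup)).2
    ↔ x ∈ dup ∨ (x ∈ seen ∧ x ∈ values) ∨ 2 ≤ values.count x := by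
  induction values generalizing seen dup with
  | nil => simp
  | cons v rest ih =>
    simp only [List.foldl_cons, ih, List.mem_cons]
    by_cases hv : x = v
    · subst hv
      by_cases hs : x ∈ seen
      · simp only [PySem.Set.contains_iff, if_pos hs]
        simp [PySem.Set.mem_add, hs]
      · simp only [PySem.Set.contains_iff, if_neg hs]
        have h1 : 2 ≤ (x :: rest).count x ↔ x ∈ rest := by
          rw [List.count_cons_self, ← List.count_pos_iff]; omega
        have h2 : 2 ≤ rest.count x → x ∈ rest :=
          fun h => List.count_pos_iff.mp (by omega)
        simp only [PySem.Set.mem_add, hs, false_and, false_or, h1]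
        tauto
    · rw [List.count_cons_of_ne (Ne.symm hv)]
      simp only [PySem.Set.contains_iff]
      split <;> simp [PySem.Set.mem_add, hv] <;> tauto

-- A's fold keeps the duplicates set duplicate-free
theorem nodupA (values : List String) (seen dup : PySem.Set String) (hd : dup.Nodup) :
    ((values.foldl
      (fun (p : PySem.Set String × PySem.Set String) value =>
        (PySem.Set.add p.1 value,
         if PySem.Set.contains p.1 value then PySem.Set.add p.2 value else p.2))
      (seen, dup)).2).Nodup := by
  induction values generalizing seen dup with
  | nil => exact hd
  | cons v rest ih =>
    simp only [List.foldl_cons]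
    exact ih _ _ (by split <;> [exact PySem.Set.nodup_add dup v hd; exact hd])

-- membership in B's duplicates set after the fold over adjacent pairs
theorem memB (ps : List (String × String)) (d : PySem.Set String) (x : String) :
    x ∈ ps.foldl
      (fun (d : PySem.Set String) pc => if pc.1 == pc.2 then PySem.Set.add d pc.2 else d) d
    ↔ x ∈ d ∨ ∃ p ∈ ps, p.1 = p.2 ∧ p.2 = x := by
  induction ps generalizing d with
  | nil => simp
  | cons p t ih =>
    simp only [List.foldl_cons, ih, List.mem_cons]
    by_cases h : p.1 = p.2 <;> simp [h, PySem.Set.mem_add] <;> tauto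

-- B's fold keeps the duplicates set duplicate-free
theorem nodupB (ps : List (String × String)) (d : PySem.Set String) (hd : d.Nodup) :
    (ps.foldl
      (fun (d : PySem.Set String) pc => if pc.1 == pc.2 then PySem.Set.add d pc.2 else d) d).Nodup := by
  induction ps generalizing d with
  | nil => exact hd
  | cons p t ih =>
    simp only [List.foldl_cons]
    exact ih _ (by split <;> [exact PySem.Set.nodup_add d p.2 hd; exact hd])

-- in a weakly increasing list, an adjacent equal pair with value x exists iff x occurs twice
theorem adj_iff (s : List String) (hs : s.Pairwise (· ≤ ·)) (x : String) :
    (∃ p ∈ List.zip s s.tail, p.1 = p.2 ∧ p.2 = x) ↔ 2 ≤ s.count x := by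
  induction s with
  | nil => simp
  | cons a t ih =>
    cases t with
    | nil =>
      have hle : List.count x [a] ≤ 1 := List.count_le_length
      simp only [List.tail_cons, List.zip_nil_right, List.not_mem_nil, false_and,
        exists_const, false_iff]
      omega
    | cons b t' =>
      rcases List.pairwise_cons.mp hs with ⟨hab, ht⟩
      rcases List.pairwise_cons.mp ht with ⟨hbt, _⟩
      rw [show List.zip (a :: b :: t') (a :: b :: t').tail
            = (a, b) :: List.zip (b :: t') (b :: t').tail from rfl]
      constructor
      · rintro ⟨p, hp, h12, h2x⟩
        rcases List.mem_cons.mp hp with hpab | hpin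
        · subst hpab
          simp only at h12 h2x
          subst h12; subst h2x
          rw [List.count_cons_self, List.count_cons_self]; omega
        · have h2 := (ih ht).mp ⟨p, hpin, h12, h2x⟩
          by_cases hxa : x = a
          · subst hxa; rw [List.count_cons_self]; omega
            -- placeholder
          · rw [List.count_cons_of_ne (Ne.symm hxa)]; exact h2
      · intro hc
        by_cases hxa : x = a
        · subst hxa
          have hxm : x ∈ b :: t' := by
            by_contra hnm
            have h0 : (b :: t').count x = 0 := List.count_eq_zero.mpr hnm
            rw [List.count_cons_self, h0] at hc; omega
          have hxb : x = b := by
            rcases List.mem_cons.mp hxm with h | h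
            · exact h
            · exact le_antisymm (hab b List.mem_cons_self) (hbt x h)
          exact ⟨(x, b), List.mem_cons_self, hxb, hxb.symm⟩
        · have h2 : 2 ≤ (b :: t').count x := by
            rw [List.count_cons_of_ne (Ne.symm hxa)] at hc; exact hc
          rcases (ih ht).mpr h2 with ⟨p, hp, h12, h2x⟩
          exact ⟨p, List.mem_cons_of_mem _ hp, h12, h2x⟩

-- ===== VERDICT (by name: the statement is the Claim_ definition above) =====
theorem duplicate_ids_py_spec : Claim_equal_duplicate_ids_py := by
  intro values _
  unfold Spec_duplicate_ids_py duplicate_ids_py duplicate_ids_py_alt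
  simp only [PySem.List.slice_from_one]
  apply PySem.List.sorted_eq_sorted_of_perm _ _ _ (fun _ _ h => h)
  apply (List.perm_ext_iff_of_nodup
    (nodupA values PySem.Set.empty PySem.Set.empty List.nodup_nil)
    (nodupB _ PySem.Set.empty List.nodup_nil)).mpr
  intro x
  rw [memA, memB, adj_iff _ (PySem.List.sorted_pairwise values (fun x => x)) x]
  have hcnt : (PySem.List.sorted values (fun x => x) false).count x = values.count x :=
    (PySem.List.sorted_perm values (fun x => x) false).count_eq x
  simp [hcnt, PySem.Set.empty]
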